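-- pv_equiv track=rewrite | github.com/BackupSUM/dashboard | DB/temp_db.py | _matches_date_field
-- ===== SOURCE A (Python) =====
-- from typing import List, Dict, Any, Optional
--
-- def _matches_date_field(record: Dict[str, Any], field_names: List[str], target_date: str) -> bool:
--     """Check if record date field matches the target date."""
--     for field_name in field_names:
--         possible_names = [field_name, field_name.lower(), field_name.upper(), field_name.title()]
--
--         for name in possible_names:
--             if name in record and record[name]:
--                 try:
--                     record_date = str(record[name]).strip()
--                     if record_date == target_date:
--                         return True
--                     # Try to match partial dates (YYYY-MM-DD format)
--                     if target_date in record_date or record_date in target_date: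
--                         return True
--                 except:
--                     continue
--
--     return False
-- ===== SOURCE B (Python) =====
-- def _matches_date_field(record, field_names, target_date):
--     """Check if record date field matches the target date (single scan over the record)."""
--     candidates = {n for f in field_names for n in (f, f.lower(), f.upper(), f.title())}
--     for key, value in record.items():
--         if key in candidates and value:
--             record_date = str(value).strip()
--             if record_date == target_date or target_date in record_date or record_date in target_date:
--                 return True
--     return False
-- ===== Notes on version B (the rewrite author's own statement) =====
-- stated objective: alternative
-- what changed: B precomputes one set of all case-variant field names and scans the record's items once, instead of A's nested loops over field names and their four spellings with a dict lookup per spelling.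
import Mathlib
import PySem

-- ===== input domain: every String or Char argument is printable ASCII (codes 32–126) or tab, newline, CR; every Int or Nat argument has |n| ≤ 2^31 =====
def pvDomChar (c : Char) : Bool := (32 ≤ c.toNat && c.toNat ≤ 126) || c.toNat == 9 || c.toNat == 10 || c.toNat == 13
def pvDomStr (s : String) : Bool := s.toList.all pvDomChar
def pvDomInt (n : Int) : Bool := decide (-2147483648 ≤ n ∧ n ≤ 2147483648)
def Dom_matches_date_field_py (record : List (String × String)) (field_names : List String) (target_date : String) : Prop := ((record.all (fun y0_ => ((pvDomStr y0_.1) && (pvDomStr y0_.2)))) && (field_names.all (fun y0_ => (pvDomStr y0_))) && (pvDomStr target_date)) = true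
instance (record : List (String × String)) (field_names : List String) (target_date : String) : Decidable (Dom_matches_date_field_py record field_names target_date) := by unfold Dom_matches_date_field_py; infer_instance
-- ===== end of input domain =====

-- B replaces A's nested loops (field names x four spellings, dict lookup each) by one precomputed
-- set of candidate spellings and a single scan over the record's items (objective: alternative).
-- str.title is not in PySem; ported by hand below, exact on the ASCII domain.

-- ===== PORT A =====

-- hand port of Python str.title(): capitalize the first letter of each alphabetic run,
-- lowercase the rest; exact for ASCII input (shared by both ports, like a PySem primitive).
def pyTitleChars (prevAlpha : Bool) : List Char → List Char
  | [] => []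
  | c :: cs =>
    (if PySem.Chars.isalpha c then
        (if prevAlpha then PySem.Chars.lowerChar c else PySem.Chars.upperChar c)
      else c) :: pyTitleChars (PySem.Chars.isalpha c) cs

def pyTitle (s : String) : String := String.ofList (pyTitleChars false s.toList)

-- the date comparison both Pythons perform verbatim on an already-looked-up value
def pvDateCmp (target_date v : String) : Bool :=
  let record_date := PySem.Str.strip v
  record_date == target_date || PySem.Str.isIn target_date record_date
    || PySem.Str.isIn record_date target_date

def matches_date_field_py (record : List (String × String)) (field_names : List String) (target_date : String) : Bool :=
  field_names.any (fun field_name =>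
    [field_name, PySem.Str.lower field_name, PySem.Str.upper field_name, pyTitle field_name].any
      (fun name =>
        match PySem.Dict.get? (PySem.Dict.mk record) name with
        | some v => if v != "" then pvDateCmp target_date v else false
        | none => false))

-- ===== PORT B =====
def matches_date_field_py_alt (record : List (String × String)) (field_names : List String) (target_date : String) : Bool :=
  let candidates : PySem.Set String :=
    PySem.Set.ofList (field_names.flatMap (fun f =>
      [f, PySem.Str.lower f, PySem.Str.upper f, pyTitle f]))
  record.any (fun kv =>
    PySem.Set.contains candidates kv.1 && kv.2 != "" && pvDateCmp target_date kv.2)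

-- ===== PRECONDITION & SPEC =====
-- Pre_ excludes association lists with duplicate keys: they represent no Python dict (a dict's
-- keys are unique), so no Python input is excluded; on such lists A reads the first binding of a
-- key while B scans every binding.
def Pre_matches_date_field_py (record : List (String × String)) (field_names : List String) (target_date : String) : Prop :=
  (record.map Prod.fst).Nodup
instance (record : List (String × String)) (field_names : List String) (target_date : String) : Decidable (Pre_matches_date_field_py record field_names target_date) := by unfold Pre_matches_date_field_py; infer_instance

def pvWitness_matches_date_field_py : (List (String × String)) × List String × String :=
  ([("date", "2024-01-02"), ("id", "7")], ["Date"], "2024-01-02")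

def Spec_matches_date_field_py (record : List (String × String)) (field_names : List String) (target_date : String) (out : Bool) : Prop := out = matches_date_field_py_alt record field_names target_date
instance (record : List (String × String)) (field_names : List String) (target_date : String) (out : Bool) : Decidable (Spec_matches_date_field_py record field_names target_date out) := by unfold Spec_matches_date_field_py; infer_instance

-- ===== CLAIM (what is proved, stated in full; the proofs are below) =====
def Claim_equal_matches_date_field_py : Prop := ∀ (record : List (String × String)) (field_names : List String) (target_date : String), Dom_matches_date_field_py record field_names target_date → Pre_matches_date_field_py record field_names target_date → Spec_matches_date_field_py record field_names target_date (matches_date_field_py record field_names target_date)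

-- ===== LEMMAS AND PROOFS =====

theorem pvWitness_ok :
    Dom_matches_date_field_py pvWitness_matches_date_field_py.1 pvWitness_matches_date_field_py.2.1 pvWitness_matches_date_field_py.2.2
    ∧ Pre_matches_date_field_py pvWitness_matches_date_field_py.1 pvWitness_matches_date_field_py.2.1 pvWitness_matches_date_field_py.2.2 := by
  constructor <;> decide

-- ===== VERDICT (by name: the statement is the Claim_ definition above) =====
theorem matches_date_field_py_spec : Claim_equal_matches_date_field_py := by
  intro record field_names target_date _hdom hpre
  have hnd : (PySem.Dict.mk record).keys.Nodup := by
    simpa [PySem.Dict.keys] using hpre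
  unfold Spec_matches_date_field_py matches_date_field_py matches_date_field_py_alt
  rw [Bool.eq_iff_iff]
  simp only [List.any_eq_true, List.mem_cons, Bool.and_eq_true]
  constructor
  · rintro ⟨f, hf, n, hn, hmatch⟩
    rcases hg : PySem.Dict.get? (PySem.Dict.mk record) n with _ | v
    · rw [hg] at hmatch; exact absurd hmatch (by simp)
    · rw [hg] at hmatch
      simp only [bne_iff_ne, ne_eq] at hmatch
      have hmem : (n, v) ∈ record :=
        (PySem.Dict.get?_eq_some_iff_mem_items (d := PySem.Dict.mk record) (k := n) (v := v) hnd).mp hg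
      by_cases hv : v = ""
      · rw [if_neg (by simp [hv])] at hmatch; exact absurd hmatch (by simp)
      · rw [if_pos hv] at hmatch
        refine ⟨(n, v), hmem, ⟨?_, by simp [hv]⟩, hmatch⟩
        rw [PySem.Set.contains_iff, PySem.Set.mem_ofList, List.mem_flatMap]
        exact ⟨f, hf, by simpa using hn⟩
  · rintro ⟨⟨k, v⟩, hkv, ⟨hc, hv⟩, hcmp⟩
    rw [PySem.Set.contains_iff, PySem.Set.mem_ofList, List.mem_flatMap] at hc
    obtain ⟨f, hf, hk⟩ := hc
    have hg : PySem.Dict.get? (PySem.Dict.mk record) k = some v :=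
      (PySem.Dict.get?_eq_some_iff_mem_items (d := PySem.Dict.mk record) (k := k) (v := v) hnd).mpr hkv
    exact ⟨f, hf, k, by simpa using hk, by rw [hg]; simp [hv, hcmp]⟩
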